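-- pv_equiv track=rewrite | github.com/lvniqi/machine-learning | stero_vision/script/stereo_test_4.py | calculate_diff_bt
-- ===== SOURCE A (Python) =====
-- def calculate_diff_bt(left, right, pixel_pos, d_max=10):
--     (row_left, left_min, left_max) = left
--     (row_right, right_min, right_max) = right
--     start_pos = (pixel_pos - d_max) if (pixel_pos - d_max) > 0 else 0
--     diff = []
--     for pos in range(start_pos, pixel_pos):
--         diff_l = max(0, row_right[pos] - left_max[pixel_pos], left_min[pixel_pos] - row_right[pos])
--         diff_r = max(0, row_left[pixel_pos] - right_max[pos], right_min[pos] - row_left[pixel_pos])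
--         diff.append(min(diff_l, diff_r))
--     diff = diff[::-1]
--     data_min = 0
--     for depth in range(len(diff)):
--         if diff[data_min] == 0:
--             break
--         if diff[depth] < diff[data_min]:
--             data_min = depth
--     return data_min
-- ===== SOURCE B (Python) =====
-- def calculate_diff_bt(left, right, pixel_pos, d_max=10):
--     # Single reverse-order pass: walk pos downward and keep a running best
--     # (index, value) instead of building the cost list, reversing it and
--     # doing a second indexed argmin pass.
--     (row_left, left_min, left_max) = left
--     (row_right, right_min, right_max) = right
--     start_pos = (pixel_pos - d_max) if (pixel_pos - d_max) > 0 else 0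
--     best_idx = 0
--     best_val = None
--     depth = 0
--     for pos in range(pixel_pos - 1, start_pos - 1, -1):
--         diff_l = max(0, row_right[pos] - left_max[pixel_pos], left_min[pixel_pos] - row_right[pos])
--         diff_r = max(0, row_left[pixel_pos] - right_max[pos], right_min[pos] - row_left[pixel_pos])
--         cost = min(diff_l, diff_r)
--         if best_val is None or cost < best_val:
--             best_idx = depth
--             best_val = cost
--         depth += 1
--     return best_idx
-- ===== Notes on version B (the rewrite author's own statement) =====
-- stated objective: simpler
-- what changed: B replaces A's three passes (build cost list, reverse it, indexed argmin loop with an early break) by one reverse-order pass over the positions that maintains a running best index/value with strict-< updates.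
import Mathlib
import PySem

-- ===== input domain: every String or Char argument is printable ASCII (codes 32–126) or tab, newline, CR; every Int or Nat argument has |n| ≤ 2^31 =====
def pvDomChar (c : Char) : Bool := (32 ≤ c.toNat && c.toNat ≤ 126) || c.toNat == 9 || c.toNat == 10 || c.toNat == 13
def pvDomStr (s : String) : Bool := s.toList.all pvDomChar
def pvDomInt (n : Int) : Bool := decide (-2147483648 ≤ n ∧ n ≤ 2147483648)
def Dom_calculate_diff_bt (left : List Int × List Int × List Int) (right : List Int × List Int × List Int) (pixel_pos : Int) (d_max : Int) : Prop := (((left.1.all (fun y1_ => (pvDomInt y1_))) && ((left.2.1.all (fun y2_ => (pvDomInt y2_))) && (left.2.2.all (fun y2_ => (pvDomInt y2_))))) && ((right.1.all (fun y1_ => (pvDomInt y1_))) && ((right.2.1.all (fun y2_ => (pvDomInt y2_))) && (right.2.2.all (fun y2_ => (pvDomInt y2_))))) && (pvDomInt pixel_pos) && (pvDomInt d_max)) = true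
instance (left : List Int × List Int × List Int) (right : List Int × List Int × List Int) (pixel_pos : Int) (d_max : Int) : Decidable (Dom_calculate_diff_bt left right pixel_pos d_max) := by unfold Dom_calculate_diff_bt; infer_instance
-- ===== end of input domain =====

-- B replaces A's three passes (cost list, reverse, indexed argmin loop with break) by one
-- reverse-order pass keeping a running best index/value; same return value (simpler, not faster).

-- ===== PORT A =====
-- A's second loop: for depth in range(len(diff)): break when diff[data_min]==0, else update data_min.
def pvLoopA (diff : List Int) (depth : Nat) (data_min : Nat) : Nat :=
  if depth < diff.length then
    if PySem.List.pyGetD diff (data_min : Int) 0 = 0 then data_min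
    else pvLoopA diff (depth + 1)
      (if PySem.List.pyGetD diff (depth : Int) 0 < PySem.List.pyGetD diff (data_min : Int) 0 then depth else data_min)
  else data_min
termination_by diff.length - depth
decreasing_by omega

def calculate_diff_bt (left : List Int × List Int × List Int) (right : List Int × List Int × List Int) (pixel_pos : Int) (d_max : Int) : Int :=
  match left, right with
  | (row_left, left_min, left_max), (row_right, right_min, right_max) =>
    let start_pos : Int := if pixel_pos - d_max > 0 then pixel_pos - d_max else 0
    let diff : List Int := (PySem.List.pyRange start_pos pixel_pos 1).foldl (fun acc pos =>
      let diff_l := max (max 0 (PySem.List.pyGetD row_right pos 0 - PySem.List.pyGetD left_max pixel_pos 0)) (PySem.List.pyGetD left_min pixel_pos 0 - PySem.List.pyGetD row_right pos 0)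
      let diff_r := max (max 0 (PySem.List.pyGetD row_left pixel_pos 0 - PySem.List.pyGetD right_max pos 0)) (PySem.List.pyGetD right_min pos 0 - PySem.List.pyGetD row_left pixel_pos 0)
      acc ++ [min diff_l diff_r]) []
    let diffRev := diff.reverse
    (pvLoopA diffRev 0 0 : Int)

-- ===== PORT B =====
def calculate_diff_bt_alt (left : List Int × List Int × List Int) (right : List Int × List Int × List Int) (pixel_pos : Int) (d_max : Int) : Int :=
  match left, right with
  | (row_left, left_min, left_max), (row_right, right_min, right_max) =>
    let start_pos : Int := if pixel_pos - d_max > 0 then pixel_pos - d_max else 0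
    let final := (PySem.List.pyRange (pixel_pos - 1) (start_pos - 1) (-1)).foldl
      (fun (st : Int × Option Int × Int) pos =>
        let diff_l := max (max 0 (PySem.List.pyGetD row_right pos 0 - PySem.List.pyGetD left_max pixel_pos 0)) (PySem.List.pyGetD left_min pixel_pos 0 - PySem.List.pyGetD row_right pos 0)
        let diff_r := max (max 0 (PySem.List.pyGetD row_left pixel_pos 0 - PySem.List.pyGetD right_max pos 0)) (PySem.List.pyGetD right_min pos 0 - PySem.List.pyGetD row_left pixel_pos 0)
        let cost := min diff_l diff_r
        match st with
        | (_, none, depth) => (depth, some cost, depth + 1)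
        | (best_idx, some v, depth) =>
          if cost < v then (depth, some cost, depth + 1) else (best_idx, some v, depth + 1))
      (0, none, 0)
    final.1

-- ===== PRECONDITION & SPEC =====
-- Pre_ excludes exactly the inputs where Python A raises IndexError: a nonempty position
-- range with pixel_pos (resp. some accessed pos) out of range of the left (resp. right) lists.
def Pre_calculate_diff_bt (left : List Int × List Int × List Int) (right : List Int × List Int × List Int) (pixel_pos : Int) (d_max : Int) : Prop :=
  (if pixel_pos - d_max > 0 then pixel_pos - d_max else 0) < pixel_pos →
    (pixel_pos < left.1.length ∧ pixel_pos < left.2.1.length ∧ pixel_pos < left.2.2.length ∧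
     pixel_pos ≤ right.1.length ∧ pixel_pos ≤ right.2.1.length ∧ pixel_pos ≤ right.2.2.length)
instance (left : List Int × List Int × List Int) (right : List Int × List Int × List Int) (pixel_pos : Int) (d_max : Int) : Decidable (Pre_calculate_diff_bt left right pixel_pos d_max) := by unfold Pre_calculate_diff_bt; infer_instance

def pvWitness_calculate_diff_bt : (List Int × List Int × List Int) × (List Int × List Int × List Int) × Int × Int :=
  (([1, 2, 3], [0, 1, 2], [2, 3, 4]), ([3, 1, 2], [2, 0, 1], [4, 2, 3]), 2, 2)

def Spec_calculate_diff_bt (left : List Int × List Int × List Int) (right : List Int × List Int × List Int) (pixel_pos : Int) (d_max : Int) (out : Int) : Prop := out = calculate_diff_bt_alt left right pixel_pos d_max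
instance (left : List Int × List Int × List Int) (right : List Int × List Int × List Int) (pixel_pos : Int) (d_max : Int) (out : Int) : Decidable (Spec_calculate_diff_bt left right pixel_pos d_max out) := by unfold Spec_calculate_diff_bt; infer_instance

-- ===== CLAIM (what is proved, stated in full; the proofs are below) =====
def Claim_equal_calculate_diff_bt : Prop := ∀ (left : List Int × List Int × List Int) (right : List Int × List Int × List Int) (pixel_pos : Int) (d_max : Int), Dom_calculate_diff_bt left right pixel_pos d_max → Pre_calculate_diff_bt left right pixel_pos d_max → Spec_calculate_diff_bt left right pixel_pos d_max (calculate_diff_bt left right pixel_pos d_max)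

-- ===== LEMMAS AND PROOFS =====

-- B's loop body as a step function on (best_idx, best_val, depth).
def pvStep (st : Int × Option Int × Int) (c : Int) : Int × Option Int × Int :=
  match st with
  | (_, none, d) => (d, some c, d + 1)
  | (bi, some v, d) => if c < v then (d, some c, d + 1) else (bi, some v, d + 1)

-- once the running minimum is 0 and all remaining costs are ≥ 0, the best index never moves
lemma pvStep_zero (L : List Int) (h : ∀ x ∈ L, 0 ≤ x) (bi d : Int) :
    (L.foldl pvStep (bi, some 0, d)).1 = bi := by
  induction L generalizing bi d with
  | nil => rfl
  | cons x xs ih =>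
    have hx : ¬ x < (0 : Int) := not_lt.mpr (h x (by simp))
    simp only [List.foldl_cons, pvStep, hx, if_false]
    exact ih (fun y hy => h y (by simp [hy])) bi (d+1)

lemma pvMain (L : List Int) (h : ∀ x ∈ L, 0 ≤ x) (depth dm : Nat) :
    ((pvLoopA L depth dm : Nat) : Int) =
      ((L.drop depth).foldl pvStep ((dm : Int), some (L.getD dm 0), (depth : Int))).1 := by
  fun_induction pvLoopA L depth dm with
  | case1 depth dm hlt hz =>
    simp only [PySem.List.pyGetD_natCast] at hz
    rw [hz]
    exact (pvStep_zero _ (fun x hx => h x (List.mem_of_mem_drop hx)) _ _).symm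
  | case2 depth dm hlt hz ih =>
    simp only [PySem.List.pyGetD_natCast] at hz ih ⊢
    rw [List.drop_eq_getElem_cons hlt, List.foldl_cons]
    have hd : L.getD depth 0 = L[depth]'hlt := List.getD_eq_getElem L 0 hlt
    by_cases hc : L.getD depth 0 < L.getD dm 0
    · rw [dif_pos hc] at ih
      rw [if_pos hc, ih]
      have : pvStep ((dm : Int), some (L.getD dm 0), (depth : Int)) (L[depth]'hlt)
          = ((depth : Int), some (L.getD depth 0), ((depth : Nat) + 1 : Int)) := by
        simp only [pvStep]
        rw [if_pos (hd ▸ hc), hd]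
      rw [this]
      norm_num
    · rw [dif_neg hc] at ih
      rw [if_neg hc, ih]
      have : pvStep ((dm : Int), some (L.getD dm 0), (depth : Int)) (L[depth]'hlt)
          = ((dm : Int), some (L.getD dm 0), ((depth : Nat) + 1 : Int)) := by
        simp only [pvStep]
        rw [if_neg (hd ▸ hc)]
      rw [this]
      norm_num
  | case3 depth dm hge =>
    rw [List.drop_eq_nil_of_le (by omega)]
    rfl

lemma pvTop (L : List Int) (h : ∀ x ∈ L, 0 ≤ x) :
    ((pvLoopA L 0 0 : Nat) : Int) = (L.foldl pvStep (0, none, 0)).1 := by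
  cases L with
  | nil => simp [pvLoopA]
  | cons x xs =>
    have := pvMain (x :: xs) h 0 0
    simp only [List.drop_zero, Nat.cast_zero, List.getD_cons_zero] at this
    rw [this]
    simp [List.foldl_cons, pvStep]

lemma pvGeneral (c : Int → Int) (hc : ∀ p, 0 ≤ c p) (s p : Int) :
    ((pvLoopA (((PySem.List.pyRange s p 1).map c).reverse) 0 0 : Nat) : Int)
      = ((PySem.List.pyRange (p - 1) (s - 1) (-1)).foldl (fun st pos => pvStep st (c pos)) (0, none, 0)).1 := by
  have h1 : PySem.List.pyRange (p - 1) (s - 1) (-1) = (PySem.List.pyRange s p 1).reverse := by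
    rw [PySem.List.pyRange_neg_one_eq_reverse]
    norm_num
  rw [h1, ← List.foldl_map, ← List.map_reverse]
  exact pvTop _ (by
    intro x hx
    simp only [List.mem_map] at hx
    obtain ⟨pos, _, rfl⟩ := hx
    exact hc pos)

-- ===== VERDICT (by name: the statement is the Claim_ definition above) =====
theorem calculate_diff_bt_spec : Claim_equal_calculate_diff_bt := by
  intro left right pixel_pos d_max _ _
  obtain ⟨row_left, left_min, left_max⟩ := left
  obtain ⟨row_right, right_min, right_max⟩ := right
  unfold Spec_calculate_diff_bt calculate_diff_bt calculate_diff_bt_alt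
  dsimp only
  rw [PySem.List.foldl_append_singleton_eq_map]
  exact pvGeneral
    (fun pos =>
      min
        (max (max 0 (PySem.List.pyGetD row_right pos 0 - PySem.List.pyGetD left_max pixel_pos 0)) (PySem.List.pyGetD left_min pixel_pos 0 - PySem.List.pyGetD row_right pos 0))
        (max (max 0 (PySem.List.pyGetD row_left pixel_pos 0 - PySem.List.pyGetD right_max pos 0)) (PySem.List.pyGetD right_min pos 0 - PySem.List.pyGetD row_left pixel_pos 0)))
    (fun pos => le_min (le_max_of_le_left (le_max_left 0 _)) (le_max_of_le_left (le_max_left 0 _)))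
    _ pixel_pos
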